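-- pv_equiv track=rewrite | github.com/go-hare/reachy_mini | src/ccmini/tools/powershell.py | classify_cmdlet
-- ===== SOURCE A (Python) =====
-- class CmdletRisk:
--     SAFE = "safe"
--     REVIEW = "review"
--     DANGEROUS = "dangerous"
--
-- _SAFE_PREFIXES = ("Get-", "Test-", "Measure-", "Select-", "Where-", "Sort-",
--                   "Group-", "Format-", "Out-", "ConvertTo-", "ConvertFrom-",
--                   "Compare-", "Find-", "Read-", "Resolve-", "Split-", "Join-")
--
-- _REVIEW_PREFIXES = ("Set-", "New-", "Add-", "Enable-", "Disable-", "Update-",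
--                     "Register-", "Unregister-", "Move-", "Copy-", "Rename-",
--                     "Export-", "Import-", "Start-", "Stop-", "Restart-",
--                     "Suspend-", "Resume-", "Send-", "Write-", "Push-", "Pop-")
--
-- _DANGEROUS_PREFIXES = ("Remove-", "Clear-", "Reset-")
--
-- _DANGEROUS_CMDLETS = frozenset({
--     "Format-Volume",
--     "Initialize-Disk",
--     "Clear-Disk",
--     "Remove-Partition",
--     "Stop-Computer",
--     "Restart-Computer",
--     "Clear-RecycleBin",
--     "Uninstall-Package",
-- })
--
-- def classify_cmdlet(name: str) -> str:
--     """Classify a PowerShell cmdlet by its verb prefix."""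
--     if name in _DANGEROUS_CMDLETS:
--         return CmdletRisk.DANGEROUS
--     for prefix in _DANGEROUS_PREFIXES:
--         if name.startswith(prefix):
--             return CmdletRisk.DANGEROUS
--     for prefix in _REVIEW_PREFIXES:
--         if name.startswith(prefix):
--             return CmdletRisk.REVIEW
--     for prefix in _SAFE_PREFIXES:
--         if name.startswith(prefix):
--             return CmdletRisk.SAFE
--     return CmdletRisk.REVIEW
-- ===== SOURCE B (Python) =====
-- _DANGEROUS_CMDLETS = frozenset({
--     "Format-Volume",
--     "Initialize-Disk",
--     "Clear-Disk",
--     "Remove-Partition",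
--     "Stop-Computer",
--     "Restart-Computer",
--     "Clear-RecycleBin",
--     "Uninstall-Package",
-- })
--
-- _VERB_RISK = {
--     "Remove": "dangerous", "Clear": "dangerous", "Reset": "dangerous",
--     "Set": "review", "New": "review", "Add": "review", "Enable": "review",
--     "Disable": "review", "Update": "review", "Register": "review",
--     "Unregister": "review", "Move": "review", "Copy": "review",
--     "Rename": "review", "Export": "review", "Import": "review",
--     "Start": "review", "Stop": "review", "Restart": "review",
--     "Suspend": "review", "Resume": "review", "Send": "review",
--     "Write": "review", "Push": "review", "Pop": "review",
--     "Get": "safe", "Test": "safe", "Measure": "safe", "Select": "safe",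
--     "Where": "safe", "Sort": "safe", "Group": "safe", "Format": "safe",
--     "Out": "safe", "ConvertTo": "safe", "ConvertFrom": "safe",
--     "Compare": "safe", "Find": "safe", "Read": "safe", "Resolve": "safe",
--     "Split": "safe", "Join": "safe",
-- }
--
-- def classify_cmdlet(name: str) -> str:
--     """Classify a PowerShell cmdlet by its verb prefix."""
--     if name in _DANGEROUS_CMDLETS:
--         return "dangerous"
--     if "-" in name:
--         verb = name.split("-", 1)[0]
--         risk = _VERB_RISK.get(verb)
--         if risk is not None:
--             return risk
--     return "review"
-- ===== Notes on version B (the rewrite author's own statement) =====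
-- stated objective: simpler
-- what changed: A's three sequential linear scans over 42 dash-terminated verb prefixes (each a startswith test) are replaced by one merged verb-to-risk dict looked up once on the part of the name before its first dash (only when the name contains a dash), keeping the full-name dangerous-set check first and the review default.
import Mathlib
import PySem

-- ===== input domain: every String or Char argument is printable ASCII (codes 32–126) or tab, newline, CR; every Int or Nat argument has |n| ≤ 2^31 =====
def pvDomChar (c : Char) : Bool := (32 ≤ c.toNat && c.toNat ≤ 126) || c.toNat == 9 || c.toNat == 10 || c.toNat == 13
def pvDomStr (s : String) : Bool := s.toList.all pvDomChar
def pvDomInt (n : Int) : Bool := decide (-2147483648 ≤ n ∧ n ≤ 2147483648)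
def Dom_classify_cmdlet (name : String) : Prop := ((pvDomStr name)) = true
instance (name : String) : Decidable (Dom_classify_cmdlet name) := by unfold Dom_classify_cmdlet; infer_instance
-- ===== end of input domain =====

-- B replaces A's three linear scans of 42 dash-terminated verb prefixes by a single merged verb→risk dict
-- looked up once on the part before the first '-' (objective: simpler; no speed claim).

-- ===== PORT A =====
def pvDangerousCmdletsA : PySem.Set String := PySem.Set.ofList ["Format-Volume", "Initialize-Disk", "Clear-Disk", "Remove-Partition", "Stop-Computer", "Restart-Computer", "Clear-RecycleBin", "Uninstall-Package"]
def pvSafePrefixes : List String := ["Get-", "Test-", "Measure-", "Select-", "Where-", "Sort-", "Group-", "Format-", "Out-", "ConvertTo-", "ConvertFrom-", "Compare-", "Find-", "Read-", "Resolve-", "Split-", "Join-"]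
def pvReviewPrefixes : List String := ["Set-", "New-", "Add-", "Enable-", "Disable-", "Update-", "Register-", "Unregister-", "Move-", "Copy-", "Rename-", "Export-", "Import-", "Start-", "Stop-", "Restart-", "Suspend-", "Resume-", "Send-", "Write-", "Push-", "Pop-"]
def pvDangerousPrefixes : List String := ["Remove-", "Clear-", "Reset-"]

def classify_cmdlet (name : String) : String :=
  if PySem.Set.contains pvDangerousCmdletsA name then "dangerous"
  else if (pvDangerousPrefixes.find? (fun p => PySem.Str.startswith name p)).isSome then "dangerous"
  else if (pvReviewPrefixes.find? (fun p => PySem.Str.startswith name p)).isSome then "review"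
  else if (pvSafePrefixes.find? (fun p => PySem.Str.startswith name p)).isSome then "safe"
  else "review"

-- ===== PORT B =====
def pvDangerousCmdletsB : PySem.Set String := PySem.Set.ofList ["Format-Volume", "Initialize-Disk", "Clear-Disk", "Remove-Partition", "Stop-Computer", "Restart-Computer", "Clear-RecycleBin", "Uninstall-Package"]
-- Source B's merged _VERB_RISK dict; the string keys are carried as List Char (the PySem list side of String)
def pvVerbRisk : PySem.Dict (List Char) String := PySem.Dict.mk [(['R', 'e', 'm', 'o', 'v', 'e'], "dangerous"),
    (['C', 'l', 'e', 'a', 'r'], "dangerous"),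
    (['R', 'e', 's', 'e', 't'], "dangerous"),
    (['S', 'e', 't'], "review"),
    (['N', 'e', 'w'], "review"),
    (['A', 'd', 'd'], "review"),
    (['E', 'n', 'a', 'b', 'l', 'e'], "review"),
    (['D', 'i', 's', 'a', 'b', 'l', 'e'], "review"),
    (['U', 'p', 'd', 'a', 't', 'e'], "review"),
    (['R', 'e', 'g', 'i', 's', 't', 'e', 'r'], "review"),
    (['U', 'n', 'r', 'e', 'g', 'i', 's', 't', 'e', 'r'], "review"),
    (['M', 'o', 'v', 'e'], "review"),
    (['C', 'o', 'p', 'y'], "review"),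
    (['R', 'e', 'n', 'a', 'm', 'e'], "review"),
    (['E', 'x', 'p', 'o', 'r', 't'], "review"),
    (['I', 'm', 'p', 'o', 'r', 't'], "review"),
    (['S', 't', 'a', 'r', 't'], "review"),
    (['S', 't', 'o', 'p'], "review"),
    (['R', 'e', 's', 't', 'a', 'r', 't'], "review"),
    (['S', 'u', 's', 'p', 'e', 'n', 'd'], "review"),
    (['R', 'e', 's', 'u', 'm', 'e'], "review"),
    (['S', 'e', 'n', 'd'], "review"),
    (['W', 'r', 'i', 't', 'e'], "review"),
    (['P', 'u', 's', 'h'], "review"),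
    (['P', 'o', 'p'], "review"),
    (['G', 'e', 't'], "safe"),
    (['T', 'e', 's', 't'], "safe"),
    (['M', 'e', 'a', 's', 'u', 'r', 'e'], "safe"),
    (['S', 'e', 'l', 'e', 'c', 't'], "safe"),
    (['W', 'h', 'e', 'r', 'e'], "safe"),
    (['S', 'o', 'r', 't'], "safe"),
    (['G', 'r', 'o', 'u', 'p'], "safe"),
    (['F', 'o', 'r', 'm', 'a', 't'], "safe"),
    (['O', 'u', 't'], "safe"),
    (['C', 'o', 'n', 'v', 'e', 'r', 't', 'T', 'o'], "safe"),
    (['C', 'o', 'n', 'v', 'e', 'r', 't', 'F', 'r', 'o', 'm'], "safe"),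
    (['C', 'o', 'm', 'p', 'a', 'r', 'e'], "safe"),
    (['F', 'i', 'n', 'd'], "safe"),
    (['R', 'e', 'a', 'd'], "safe"),
    (['R', 'e', 's', 'o', 'l', 'v', 'e'], "safe"),
    (['S', 'p', 'l', 'i', 't'], "safe"),
    (['J', 'o', 'i', 'n'], "safe")]

def classify_cmdlet_alt (name : String) : String :=
  if PySem.Set.contains pvDangerousCmdletsB name then "dangerous"
  else if PySem.Str.isIn "-" name then
    -- name.split("-", 1)[0] = exactly the characters before the first '-' (exact: '-' occurs in name here)
    match pvVerbRisk.get? (name.toList.takeWhile (fun c => c != '-')) with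
    | some risk => risk
    | none => "review"
  else "review"

-- ===== PRECONDITION & SPEC =====
def Spec_classify_cmdlet (name : String) (out : String) : Prop := out = classify_cmdlet_alt name
instance (name : String) (out : String) : Decidable (Spec_classify_cmdlet name out) := by unfold Spec_classify_cmdlet; infer_instance

-- ===== CLAIM (what is proved, stated in full; the proofs are below) =====
def Claim_equal_classify_cmdlet : Prop := ∀ (name : String), Dom_classify_cmdlet name → Spec_classify_cmdlet name (classify_cmdlet name)

-- ===== LEMMAS AND PROOFS =====

-- "name starts with the prefix v ++ "-"" ↔ "name contains '-' and its verb part (before the first '-') is v"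
theorem pv_prefix_dash_iff (v l : List Char) (hv : '-' ∉ v) :
    (v ++ ['-']) <+: l ↔ ('-' ∈ l ∧ v = l.takeWhile (fun c => c != '-')) := by
  constructor
  · rintro ⟨t, rfl⟩
    refine ⟨by simp, ?_⟩
    rw [List.append_assoc, List.takeWhile_append_of_pos (by
      intro x hx; simp [bne_iff_ne]; rintro rfl; exact hv hx)]
    simp
  · rintro ⟨h1, h2⟩
    have hsplit := (List.takeWhile_append_dropWhile (p := fun c => c != '-') (l := l)).symm
    have hne : l.dropWhile (fun c => c != '-') ≠ [] := by
      intro hnil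
      rw [hsplit, hnil, List.append_nil] at h1
      have := List.mem_takeWhile_imp h1
      simp at this
    have hhead := List.head_dropWhile_not (fun c => c != '-') hne
    simp only [bne_eq_false_iff_eq] at hhead
    refine ⟨(l.dropWhile (fun c => c != '-')).tail, ?_⟩
    conv_rhs => rw [hsplit]
    have hdrop : l.dropWhile (fun c => c != '-') = '-' :: (l.dropWhile (fun c => c != '-')).tail := by
      conv_lhs => rw [← List.cons_head_tail hne]
      rw [hhead]
    rw [← h2, List.append_assoc, List.singleton_append]
    congr 1
    exact hdrop.symm

-- the same fact on the Bool startswith the port of A uses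
theorem pv_sw_eq (name : String) (v : List Char) (p : String)
    (hp : p.toList = v ++ ['-']) (hv : '-' ∉ v) :
    PySem.Str.startswith name p
      = (name.toList.contains '-' && (v == name.toList.takeWhile (fun c => c != '-'))) := by
  rw [PySem.Str.startswith_eq, Bool.eq_iff_iff]
  rw [PySem.Chars.startswith_iff, hp]
  simp [pv_prefix_dash_iff v name.toList hv]

-- the '"-" in name' test of B is the same '-'-containment
theorem pv_isIn_dash (s : String) : PySem.Str.isIn "-" s = s.toList.contains '-' := by
  rw [Bool.eq_iff_iff, PySem.Str.isIn_iff_infix]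
  have h : ("-" : String).toList = ['-'] := by decide
  rw [h, List.singleton_infix_iff]
  simp

-- ===== VERDICT (by name: the statement is the Claim_ definition above) =====
set_option maxHeartbeats 2000000 in
theorem classify_cmdlet_spec : Claim_equal_classify_cmdlet := by
  intro name _
  unfold Spec_classify_cmdlet classify_cmdlet classify_cmdlet_alt
  rw [show pvDangerousCmdletsB = pvDangerousCmdletsA from rfl, pv_isIn_dash]
  by_cases hD : PySem.Set.contains pvDangerousCmdletsA name = true
  · rw [if_pos hD, if_pos hD]
  · rw [if_neg hD, if_neg hD]
    simp only [pvDangerousPrefixes, pvReviewPrefixes, pvSafePrefixes, pvVerbRisk,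
      List.find?_cons, List.find?_nil]
    simp only [pv_sw_eq name (['R', 'e', 'm', 'o', 'v', 'e']) "Remove-" (by decide) (by decide),
      pv_sw_eq name (['C', 'l', 'e', 'a', 'r']) "Clear-" (by decide) (by decide),
      pv_sw_eq name (['R', 'e', 's', 'e', 't']) "Reset-" (by decide) (by decide),
      pv_sw_eq name (['S', 'e', 't']) "Set-" (by decide) (by decide),
      pv_sw_eq name (['N', 'e', 'w']) "New-" (by decide) (by decide),
      pv_sw_eq name (['A', 'd', 'd']) "Add-" (by decide) (by decide),
      pv_sw_eq name (['E', 'n', 'a', 'b', 'l', 'e']) "Enable-" (by decide) (by decide),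
      pv_sw_eq name (['D', 'i', 's', 'a', 'b', 'l', 'e']) "Disable-" (by decide) (by decide),
      pv_sw_eq name (['U', 'p', 'd', 'a', 't', 'e']) "Update-" (by decide) (by decide),
      pv_sw_eq name (['R', 'e', 'g', 'i', 's', 't', 'e', 'r']) "Register-" (by decide) (by decide),
      pv_sw_eq name (['U', 'n', 'r', 'e', 'g', 'i', 's', 't', 'e', 'r']) "Unregister-" (by decide) (by decide),
      pv_sw_eq name (['M', 'o', 'v', 'e']) "Move-" (by decide) (by decide),
      pv_sw_eq name (['C', 'o', 'p', 'y']) "Copy-" (by decide) (by decide),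
      pv_sw_eq name (['R', 'e', 'n', 'a', 'm', 'e']) "Rename-" (by decide) (by decide),
      pv_sw_eq name (['E', 'x', 'p', 'o', 'r', 't']) "Export-" (by decide) (by decide),
      pv_sw_eq name (['I', 'm', 'p', 'o', 'r', 't']) "Import-" (by decide) (by decide),
      pv_sw_eq name (['S', 't', 'a', 'r', 't']) "Start-" (by decide) (by decide),
      pv_sw_eq name (['S', 't', 'o', 'p']) "Stop-" (by decide) (by decide),
      pv_sw_eq name (['R', 'e', 's', 't', 'a', 'r', 't']) "Restart-" (by decide) (by decide),
      pv_sw_eq name (['S', 'u', 's', 'p', 'e', 'n', 'd']) "Suspend-" (by decide) (by decide),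
      pv_sw_eq name (['R', 'e', 's', 'u', 'm', 'e']) "Resume-" (by decide) (by decide),
      pv_sw_eq name (['S', 'e', 'n', 'd']) "Send-" (by decide) (by decide),
      pv_sw_eq name (['W', 'r', 'i', 't', 'e']) "Write-" (by decide) (by decide),
      pv_sw_eq name (['P', 'u', 's', 'h']) "Push-" (by decide) (by decide),
      pv_sw_eq name (['P', 'o', 'p']) "Pop-" (by decide) (by decide),
      pv_sw_eq name (['G', 'e', 't']) "Get-" (by decide) (by decide),
      pv_sw_eq name (['T', 'e', 's', 't']) "Test-" (by decide) (by decide),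
      pv_sw_eq name (['M', 'e', 'a', 's', 'u', 'r', 'e']) "Measure-" (by decide) (by decide),
      pv_sw_eq name (['S', 'e', 'l', 'e', 'c', 't']) "Select-" (by decide) (by decide),
      pv_sw_eq name (['W', 'h', 'e', 'r', 'e']) "Where-" (by decide) (by decide),
      pv_sw_eq name (['S', 'o', 'r', 't']) "Sort-" (by decide) (by decide),
      pv_sw_eq name (['G', 'r', 'o', 'u', 'p']) "Group-" (by decide) (by decide),
      pv_sw_eq name (['F', 'o', 'r', 'm', 'a', 't']) "Format-" (by decide) (by decide),
      pv_sw_eq name (['O', 'u', 't']) "Out-" (by decide) (by decide),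
      pv_sw_eq name (['C', 'o', 'n', 'v', 'e', 'r', 't', 'T', 'o']) "ConvertTo-" (by decide) (by decide),
      pv_sw_eq name (['C', 'o', 'n', 'v', 'e', 'r', 't', 'F', 'r', 'o', 'm']) "ConvertFrom-" (by decide) (by decide),
      pv_sw_eq name (['C', 'o', 'm', 'p', 'a', 'r', 'e']) "Compare-" (by decide) (by decide),
      pv_sw_eq name (['F', 'i', 'n', 'd']) "Find-" (by decide) (by decide),
      pv_sw_eq name (['R', 'e', 'a', 'd']) "Read-" (by decide) (by decide),
      pv_sw_eq name (['R', 'e', 's', 'o', 'l', 'v', 'e']) "Resolve-" (by decide) (by decide),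
      pv_sw_eq name (['S', 'p', 'l', 'i', 't']) "Split-" (by decide) (by decide),
      pv_sw_eq name (['J', 'o', 'i', 'n']) "Join-" (by decide) (by decide)]
    by_cases hc : name.toList.contains '-' = true
    · simp only [hc, Bool.true_and]
      generalize name.toList.takeWhile (fun c => c != '-') = w
      by_cases h0 : ((['R', 'e', 'm', 'o', 'v', 'e'] : List Char) == w) = true
      · simp [h0, PySem.Dict.get?, List.find?]
      rw [Bool.not_eq_true] at h0
      by_cases h1 : ((['C', 'l', 'e', 'a', 'r'] : List Char) == w) = true
      · simp [h1, h0, PySem.Dict.get?, List.find?]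
      rw [Bool.not_eq_true] at h1
      by_cases h2 : ((['R', 'e', 's', 'e', 't'] : List Char) == w) = true
      · simp [h2, h0, h1, PySem.Dict.get?, List.find?]
      rw [Bool.not_eq_true] at h2
      by_cases h3 : ((['S', 'e', 't'] : List Char) == w) = true
      · simp [h3, h0, h1, h2, PySem.Dict.get?, List.find?]
      rw [Bool.not_eq_true] at h3
      by_cases h4 : ((['N', 'e', 'w'] : List Char) == w) = true
      · simp [h4, h0, h1, h2, h3, PySem.Dict.get?, List.find?]
      rw [Bool.not_eq_true] at h4
      by_cases h5 : ((['A', 'd', 'd'] : List Char) == w) = true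
      · simp [h5, h0, h1, h2, h3, h4, PySem.Dict.get?, List.find?]
      rw [Bool.not_eq_true] at h5
      by_cases h6 : ((['E', 'n', 'a', 'b', 'l', 'e'] : List Char) == w) = true
      · simp [h6, h0, h1, h2, h3, h4, h5, PySem.Dict.get?, List.find?]
      rw [Bool.not_eq_true] at h6
      by_cases h7 : ((['D', 'i', 's', 'a', 'b', 'l', 'e'] : List Char) == w) = true
      · simp [h7, h0, h1, h2, h3, h4, h5, h6, PySem.Dict.get?, List.find?]
      rw [Bool.not_eq_true] at h7
      by_cases h8 : ((['U', 'p', 'd', 'a', 't', 'e'] : List Char) == w) = true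
      · simp [h8, h0, h1, h2, h3, h4, h5, h6, h7, PySem.Dict.get?, List.find?]
      rw [Bool.not_eq_true] at h8
      by_cases h9 : ((['R', 'e', 'g', 'i', 's', 't', 'e', 'r'] : List Char) == w) = true
      · simp [h9, h0, h1, h2, h3, h4, h5, h6, h7, h8, PySem.Dict.get?, List.find?]
      rw [Bool.not_eq_true] at h9
      by_cases h10 : ((['U', 'n', 'r', 'e', 'g', 'i', 's', 't', 'e', 'r'] : List Char) == w) = true
      · simp [h10, h0, h1, h2, h3, h4, h5, h6, h7, h8, h9, PySem.Dict.get?, List.find?]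
      rw [Bool.not_eq_true] at h10
      by_cases h11 : ((['M', 'o', 'v', 'e'] : List Char) == w) = true
      · simp [h11, h0, h1, h2, h3, h4, h5, h6, h7, h8, h9, h10, PySem.Dict.get?, List.find?]
      rw [Bool.not_eq_true] at h11
      by_cases h12 : ((['C', 'o', 'p', 'y'] : List Char) == w) = true
      · simp [h12, h0, h1, h2, h3, h4, h5, h6, h7, h8, h9, h10, h11, PySem.Dict.get?, List.find?]
      rw [Bool.not_eq_true] at h12
      by_cases h13 : ((['R', 'e', 'n', 'a', 'm', 'e'] : List Char) == w) = true
      · simp [h13, h0, h1, h2, h3, h4, h5, h6, h7, h8, h9, h10, h11, h12, PySem.Dict.get?, List.find?]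
      rw [Bool.not_eq_true] at h13
      by_cases h14 : ((['E', 'x', 'p', 'o', 'r', 't'] : List Char) == w) = true
      · simp [h14, h0, h1, h2, h3, h4, h5, h6, h7, h8, h9, h10, h11, h12, h13, PySem.Dict.get?, List.find?]
      rw [Bool.not_eq_true] at h14
      by_cases h15 : ((['I', 'm', 'p', 'o', 'r', 't'] : List Char) == w) = true
      · simp [h15, h0, h1, h2, h3, h4, h5, h6, h7, h8, h9, h10, h11, h12, h13, h14, PySem.Dict.get?, List.find?]
      rw [Bool.not_eq_true] at h15
      by_cases h16 : ((['S', 't', 'a', 'r', 't'] : List Char) == w) = true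
      · simp [h16, h0, h1, h2, h3, h4, h5, h6, h7, h8, h9, h10, h11, h12, h13, h14, h15, PySem.Dict.get?, List.find?]
      rw [Bool.not_eq_true] at h16
      by_cases h17 : ((['S', 't', 'o', 'p'] : List Char) == w) = true
      · simp [h17, h0, h1, h2, h3, h4, h5, h6, h7, h8, h9, h10, h11, h12, h13, h14, h15, h16, PySem.Dict.get?, List.find?]
      rw [Bool.not_eq_true] at h17
      by_cases h18 : ((['R', 'e', 's', 't', 'a', 'r', 't'] : List Char) == w) = true
      · simp [h18, h0, h1, h2, h3, h4, h5, h6, h7, h8, h9, h10, h11, h12, h13, h14, h15, h16, h17, PySem.Dict.get?, List.find?]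
      rw [Bool.not_eq_true] at h18
      by_cases h19 : ((['S', 'u', 's', 'p', 'e', 'n', 'd'] : List Char) == w) = true
      · simp [h19, h0, h1, h2, h3, h4, h5, h6, h7, h8, h9, h10, h11, h12, h13, h14, h15, h16, h17, h18, PySem.Dict.get?, List.find?]
      rw [Bool.not_eq_true] at h19
      by_cases h20 : ((['R', 'e', 's', 'u', 'm', 'e'] : List Char) == w) = true
      · simp [h20, h0, h1, h2, h3, h4, h5, h6, h7, h8, h9, h10, h11, h12, h13, h14, h15, h16, h17, h18, h19, PySem.Dict.get?, List.find?]
      rw [Bool.not_eq_true] at h20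
      by_cases h21 : ((['S', 'e', 'n', 'd'] : List Char) == w) = true
      · simp [h21, h0, h1, h2, h3, h4, h5, h6, h7, h8, h9, h10, h11, h12, h13, h14, h15, h16, h17, h18, h19, h20, PySem.Dict.get?, List.find?]
      rw [Bool.not_eq_true] at h21
      by_cases h22 : ((['W', 'r', 'i', 't', 'e'] : List Char) == w) = true
      · simp [h22, h0, h1, h2, h3, h4, h5, h6, h7, h8, h9, h10, h11, h12, h13, h14, h15, h16, h17, h18, h19, h20, h21, PySem.Dict.get?, List.find?]
      rw [Bool.not_eq_true] at h22
      by_cases h23 : ((['P', 'u', 's', 'h'] : List Char) == w) = true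
      · simp [h23, h0, h1, h2, h3, h4, h5, h6, h7, h8, h9, h10, h11, h12, h13, h14, h15, h16, h17, h18, h19, h20, h21, h22, PySem.Dict.get?, List.find?]
      rw [Bool.not_eq_true] at h23
      by_cases h24 : ((['P', 'o', 'p'] : List Char) == w) = true
      · simp [h24, h0, h1, h2, h3, h4, h5, h6, h7, h8, h9, h10, h11, h12, h13, h14, h15, h16, h17, h18, h19, h20, h21, h22, h23, PySem.Dict.get?, List.find?]
      rw [Bool.not_eq_true] at h24
      by_cases h25 : ((['G', 'e', 't'] : List Char) == w) = true
      · simp [h25, h0, h1, h2, h3, h4, h5, h6, h7, h8, h9, h10, h11, h12, h13, h14, h15, h16, h17, h18, h19, h20, h21, h22, h23, h24, PySem.Dict.get?, List.find?]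
      rw [Bool.not_eq_true] at h25
      by_cases h26 : ((['T', 'e', 's', 't'] : List Char) == w) = true
      · simp [h26, h0, h1, h2, h3, h4, h5, h6, h7, h8, h9, h10, h11, h12, h13, h14, h15, h16, h17, h18, h19, h20, h21, h22, h23, h24, h25, PySem.Dict.get?, List.find?]
      rw [Bool.not_eq_true] at h26
      by_cases h27 : ((['M', 'e', 'a', 's', 'u', 'r', 'e'] : List Char) == w) = true
      · simp [h27, h0, h1, h2, h3, h4, h5, h6, h7, h8, h9, h10, h11, h12, h13, h14, h15, h16, h17, h18, h19, h20, h21, h22, h23, h24, h25, h26, PySem.Dict.get?, List.find?]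
      rw [Bool.not_eq_true] at h27
      by_cases h28 : ((['S', 'e', 'l', 'e', 'c', 't'] : List Char) == w) = true
      · simp [h28, h0, h1, h2, h3, h4, h5, h6, h7, h8, h9, h10, h11, h12, h13, h14, h15, h16, h17, h18, h19, h20, h21, h22, h23, h24, h25, h26, h27, PySem.Dict.get?, List.find?]
      rw [Bool.not_eq_true] at h28
      by_cases h29 : ((['W', 'h', 'e', 'r', 'e'] : List Char) == w) = true
      · simp [h29, h0, h1, h2, h3, h4, h5, h6, h7, h8, h9, h10, h11, h12, h13, h14, h15, h16, h17, h18, h19, h20, h21, h22, h23, h24, h25, h26, h27, h28, PySem.Dict.get?, List.find?]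
      rw [Bool.not_eq_true] at h29
      by_cases h30 : ((['S', 'o', 'r', 't'] : List Char) == w) = true
      · simp [h30, h0, h1, h2, h3, h4, h5, h6, h7, h8, h9, h10, h11, h12, h13, h14, h15, h16, h17, h18, h19, h20, h21, h22, h23, h24, h25, h26, h27, h28, h29, PySem.Dict.get?, List.find?]
      rw [Bool.not_eq_true] at h30
      by_cases h31 : ((['G', 'r', 'o', 'u', 'p'] : List Char) == w) = true
      · simp [h31, h0, h1, h2, h3, h4, h5, h6, h7, h8, h9, h10, h11, h12, h13, h14, h15, h16, h17, h18, h19, h20, h21, h22, h23, h24, h25, h26, h27, h28, h29, h30, PySem.Dict.get?, List.find?]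
      rw [Bool.not_eq_true] at h31
      by_cases h32 : ((['F', 'o', 'r', 'm', 'a', 't'] : List Char) == w) = true
      · simp [h32, h0, h1, h2, h3, h4, h5, h6, h7, h8, h9, h10, h11, h12, h13, h14, h15, h16, h17, h18, h19, h20, h21, h22, h23, h24, h25, h26, h27, h28, h29, h30, h31, PySem.Dict.get?, List.find?]
      rw [Bool.not_eq_true] at h32
      by_cases h33 : ((['O', 'u', 't'] : List Char) == w) = true
      · simp [h33, h0, h1, h2, h3, h4, h5, h6, h7, h8, h9, h10, h11, h12, h13, h14, h15, h16, h17, h18, h19, h20, h21, h22, h23, h24, h25, h26, h27, h28, h29, h30, h31, h32, PySem.Dict.get?, List.find?]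
      rw [Bool.not_eq_true] at h33
      by_cases h34 : ((['C', 'o', 'n', 'v', 'e', 'r', 't', 'T', 'o'] : List Char) == w) = true
      · simp [h34, h0, h1, h2, h3, h4, h5, h6, h7, h8, h9, h10, h11, h12, h13, h14, h15, h16, h17, h18, h19, h20, h21, h22, h23, h24, h25, h26, h27, h28, h29, h30, h31, h32, h33, PySem.Dict.get?, List.find?]
      rw [Bool.not_eq_true] at h34
      by_cases h35 : ((['C', 'o', 'n', 'v', 'e', 'r', 't', 'F', 'r', 'o', 'm'] : List Char) == w) = true
      · simp [h35, h0, h1, h2, h3, h4, h5, h6, h7, h8, h9, h10, h11, h12, h13, h14, h15, h16, h17, h18, h19, h20, h21, h22, h23, h24, h25, h26, h27, h28, h29, h30, h31, h32, h33, h34, PySem.Dict.get?, List.find?]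
      rw [Bool.not_eq_true] at h35
      by_cases h36 : ((['C', 'o', 'm', 'p', 'a', 'r', 'e'] : List Char) == w) = true
      · simp [h36, h0, h1, h2, h3, h4, h5, h6, h7, h8, h9, h10, h11, h12, h13, h14, h15, h16, h17, h18, h19, h20, h21, h22, h23, h24, h25, h26, h27, h28, h29, h30, h31, h32, h33, h34, h35, PySem.Dict.get?, List.find?]
      rw [Bool.not_eq_true] at h36
      by_cases h37 : ((['F', 'i', 'n', 'd'] : List Char) == w) = true
      · simp [h37, h0, h1, h2, h3, h4, h5, h6, h7, h8, h9, h10, h11, h12, h13, h14, h15, h16, h17, h18, h19, h20, h21, h22, h23, h24, h25, h26, h27, h28, h29, h30, h31, h32, h33, h34, h35, h36, PySem.Dict.get?, List.find?]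
      rw [Bool.not_eq_true] at h37
      by_cases h38 : ((['R', 'e', 'a', 'd'] : List Char) == w) = true
      · simp [h38, h0, h1, h2, h3, h4, h5, h6, h7, h8, h9, h10, h11, h12, h13, h14, h15, h16, h17, h18, h19, h20, h21, h22, h23, h24, h25, h26, h27, h28, h29, h30, h31, h32, h33, h34, h35, h36, h37, PySem.Dict.get?, List.find?]
      rw [Bool.not_eq_true] at h38
      by_cases h39 : ((['R', 'e', 's', 'o', 'l', 'v', 'e'] : List Char) == w) = true
      · simp [h39, h0, h1, h2, h3, h4, h5, h6, h7, h8, h9, h10, h11, h12, h13, h14, h15, h16, h17, h18, h19, h20, h21, h22, h23, h24, h25, h26, h27, h28, h29, h30, h31, h32, h33, h34, h35, h36, h37, h38, PySem.Dict.get?, List.find?]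
      rw [Bool.not_eq_true] at h39
      by_cases h40 : ((['S', 'p', 'l', 'i', 't'] : List Char) == w) = true
      · simp [h40, h0, h1, h2, h3, h4, h5, h6, h7, h8, h9, h10, h11, h12, h13, h14, h15, h16, h17, h18, h19, h20, h21, h22, h23, h24, h25, h26, h27, h28, h29, h30, h31, h32, h33, h34, h35, h36, h37, h38, h39, PySem.Dict.get?, List.find?]
      rw [Bool.not_eq_true] at h40
      by_cases h41 : ((['J', 'o', 'i', 'n'] : List Char) == w) = true
      · simp [h41, h0, h1, h2, h3, h4, h5, h6, h7, h8, h9, h10, h11, h12, h13, h14, h15, h16, h17, h18, h19, h20, h21, h22, h23, h24, h25, h26, h27, h28, h29, h30, h31, h32, h33, h34, h35, h36, h37, h38, h39, h40, PySem.Dict.get?, List.find?]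
      rw [Bool.not_eq_true] at h41
      simp [PySem.Dict.get?, List.find?, h0, h1, h2, h3, h4, h5, h6, h7, h8, h9, h10, h11, h12, h13, h14, h15, h16, h17, h18, h19, h20, h21, h22, h23, h24, h25, h26, h27, h28, h29, h30, h31, h32, h33, h34, h35, h36, h37, h38, h39, h40, h41]
    · rw [Bool.not_eq_true] at hc
      have hmem : ¬('-' ∈ name.toList) := by simpa using hc
      simp [hmem]
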